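-- pv_equiv track=rewrite | github.com/tborzyszkowski/python-programming | src/_01-introduction/control-flow/exercises/solutions_control_flow.py | fizzbuzz_zaawansowany
-- ===== SOURCE A (Python) =====
-- def fizzbuzz_zaawansowany(n: int, zasady: dict[int, str]) -> list[str]:
--     wynik = []
--     for liczba in range(1, n + 1):
--         tekst = "".join(
--             etykieta
--             for dzielnik, etykieta in sorted(zasady.items())
--             if liczba % dzielnik == 0
--         )
--         wynik.append(tekst if tekst else str(liczba))
--     return wynik
-- ===== SOURCE B (Python) =====
-- def fizzbuzz_zaawansowany(n: int, zasady: dict[int, str]) -> list[str]: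
--     m = n if n > 0 else 0
--     parts = [[] for _ in range(m + 1)]
--     for dzielnik, etykieta in sorted(zasady.items()):
--         if dzielnik != 0:
--             step = abs(dzielnik)
--             for i in range(step, m + 1, step):
--                 parts[i].append(etykieta)
--     return ["".join(parts[i]) or str(i) for i in range(1, m + 1)]
-- ===== Notes on version B (the rewrite author's own statement) =====
-- stated objective: faster
-- what changed: A re-sorts the rules and scans all of them for every number 1..n; B sorts the rules once and sieves: for each divisor d it appends its label to the buckets of its multiples (harmonic number of touches), then joins each bucket or falls back to str(i).
import Mathlib
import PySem

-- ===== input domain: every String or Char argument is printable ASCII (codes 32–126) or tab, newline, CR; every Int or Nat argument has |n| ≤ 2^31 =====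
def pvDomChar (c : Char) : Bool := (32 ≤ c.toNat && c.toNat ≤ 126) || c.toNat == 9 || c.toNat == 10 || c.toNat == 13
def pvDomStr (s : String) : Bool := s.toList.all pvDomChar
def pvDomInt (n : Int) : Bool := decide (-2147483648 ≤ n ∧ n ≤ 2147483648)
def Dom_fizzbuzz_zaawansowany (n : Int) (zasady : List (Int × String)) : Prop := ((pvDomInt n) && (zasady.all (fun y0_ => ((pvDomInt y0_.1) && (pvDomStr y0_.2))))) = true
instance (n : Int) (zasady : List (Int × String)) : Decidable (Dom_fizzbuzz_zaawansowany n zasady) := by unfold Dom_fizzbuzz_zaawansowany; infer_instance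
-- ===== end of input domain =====

-- B replaces A's per-number scan of the (re-)sorted rule list by a one-time sort plus a
-- sieve that appends each label to the buckets of its divisor's multiples (objective: faster).

-- ===== PORT A =====
-- 'sorted(zasady.items())' sorts pairs; dict keys are unique, so the lexicographic pair
-- sort is the stable sort by (key, value) = sorted2 (exact).
def fizzbuzz_zaawansowany (n : Int) (zasady : List (Int × String)) : List String :=
  (PySem.List.pyRange 1 (n + 1) 1).foldl
    (fun wynik liczba =>
      let tekst := PySem.Str.join ""
        (((PySem.List.sorted2 (PySem.Dict.ofList zasady).items (fun p => p.1) (fun p => p.2)).filter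
            (fun p => PySem.Int.mod liczba p.1 == 0)).map (fun p => p.2))
      wynik ++ [if tekst ≠ "" then tekst else PySem.Int.toStr liczba])
    []

-- ===== PORT B =====
def fizzbuzz_zaawansowany_alt (n : Int) (zasady : List (Int × String)) : List String :=
  let m : Int := if n > 0 then n else 0
  let parts : Array (List String) :=
    (PySem.List.sorted2 (PySem.Dict.ofList zasady).items (fun p => p.1) (fun p => p.2)).foldl
      (fun parts p =>
        if p.1 ≠ 0 then
          (PySem.List.pyRange |p.1| (m + 1) |p.1|).foldl
            (fun parts i => parts.modify i.toNat (fun l => l ++ [p.2])) parts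
        else parts)
      (Array.replicate (m + 1).toNat [])
  (PySem.List.pyRange 1 (m + 1) 1).map (fun i =>
    let t := PySem.Str.join "" (parts[i.toNat]!)
    if t ≠ "" then t else PySem.Int.toStr i)

-- ===== PRECONDITION & SPEC =====
-- Pre_ excludes exactly the inputs where A raises ZeroDivisionError: a 0 divisor with n ≥ 1.
def Pre_fizzbuzz_zaawansowany (n : Int) (zasady : List (Int × String)) : Prop :=
  1 ≤ n → ∀ p ∈ zasady, p.1 ≠ 0
instance (n : Int) (zasady : List (Int × String)) : Decidable (Pre_fizzbuzz_zaawansowany n zasady) := by unfold Pre_fizzbuzz_zaawansowany; infer_instance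

def pvWitness_fizzbuzz_zaawansowany : Int × (List (Int × String)) := (5, [(3, "Fizz"), (5, "Buzz")])

def Spec_fizzbuzz_zaawansowany (n : Int) (zasady : List (Int × String)) (out : List String) : Prop := out = fizzbuzz_zaawansowany_alt n zasady
instance (n : Int) (zasady : List (Int × String)) (out : List String) : Decidable (Spec_fizzbuzz_zaawansowany n zasady out) := by unfold Spec_fizzbuzz_zaawansowany; infer_instance

-- ===== CLAIM (what is proved, stated in full; the proofs are below) =====
def Claim_equal_fizzbuzz_zaawansowany : Prop := ∀ (n : Int) (zasady : List (Int × String)), Dom_fizzbuzz_zaawansowany n zasady → Pre_fizzbuzz_zaawansowany n zasady → Spec_fizzbuzz_zaawansowany n zasady (fizzbuzz_zaawansowany n zasady)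

-- ===== LEMMAS AND PROOFS =====

-- A fold of in-bounds 'modify's preserves the array size.
lemma pvSizeFoldlModify (l : List Int) (f : List String → List String) (a : Array (List String)) :
    (l.foldl (fun a i => a.modify i.toNat f) a).size = a.size := by
  induction l generalizing a with
  | nil => rfl
  | cons x xs ih => simp [List.foldl_cons, ih, Array.size_modify]

-- Reading one cell after a fold of 'modify's over distinct nonnegative indices.
lemma pvGetFoldlModify (l : List Int) (hnd : l.Nodup) (h0 : ∀ x ∈ l, 0 ≤ x)
    (f : List String → List String) (a : Array (List String)) (j : Nat) (hj : j < a.size) :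
    (l.foldl (fun a i => a.modify i.toNat f) a)[j]! = if (j : Int) ∈ l then f (a[j]!) else a[j]! := by
  induction l generalizing a with
  | nil => simp
  | cons x xs ih =>
    have hx0 : 0 ≤ x := h0 x (by simp)
    have hnd' := (List.nodup_cons.mp hnd).2
    have hxnot := (List.nodup_cons.mp hnd).1
    have hj' : j < (a.modify x.toNat f).size := by simpa [Array.size_modify] using hj
    rw [List.foldl_cons, ih hnd' (fun y hy => h0 y (by simp [hy])) _ hj']
    have hmod : (a.modify x.toNat f)[j]! = if x.toNat = j then f (a[j]!) else a[j]! := by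
      rw [getElem!_pos _ j hj', Array.getElem_modify, getElem!_pos _ j hj]
    by_cases hxj : (j : Int) = x
    · have hteq : x.toNat = j := by omega
      have hnotin : (j : Int) ∉ xs := by rw [hxj]; exact hxnot
      rw [if_neg hnotin, hmod, if_pos hteq, if_pos (by simp [hxj])]
    · have hne : x.toNat ≠ j := by omega
      rw [hmod, if_neg hne]
      by_cases hjx : (j : Int) ∈ xs
      · rw [if_pos hjx, if_pos (by simp [hjx])]
      · rw [if_neg hjx, if_neg (by simp [hxj, hjx])]

lemma pvNodupRange (s b : Int) (hs : 0 < s) : (PySem.List.pyRange s b s).Nodup := by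
  rw [PySem.List.pyRange_of_pos s b hs]
  exact List.nodup_range.map (fun k1 k2 h => by
    have : s * (k1 : Int) = s * k2 := by omega
    exact_mod_cast mul_left_cancel₀ (by omega) this)

-- Membership in the sieve range is divisibility (for 1 ≤ j ≤ m).
lemma pvMemRangeIffDvd (s m j : Int) (hs : 0 < s) (h1 : 1 ≤ j) (hm : j ≤ m) :
    j ∈ PySem.List.pyRange s (m + 1) s ↔ s ∣ j := by
  rw [PySem.List.mem_pyRange_iff_of_pos hs]
  constructor
  · rintro ⟨-, -, h⟩
    have : j - s + s = j := by ring
    simpa [this] using dvd_add h (dvd_refl s)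
  · intro h
    exact ⟨Int.le_of_dvd (by omega) h, by omega, (dvd_sub_right h).mpr (dvd_refl s)⟩

-- Sieve characterisation: after processing all rules, bucket j holds the labels of the
-- rules whose divisor divides j, in rule order.
lemma pvSieve (m : Int) (rules : List (Int × String)) (hz : ∀ p ∈ rules, p.1 ≠ 0)
    (j : Int) (h1 : 1 ≤ j) (hm : j ≤ m) :
    ∀ (a : Array (List String)), a.size = (m + 1).toNat →
      (rules.foldl
        (fun parts p =>
          if p.1 ≠ 0 then
            (PySem.List.pyRange |p.1| (m + 1) |p.1|).foldl
              (fun parts i => parts.modify i.toNat (fun l => l ++ [p.2])) parts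
          else parts) a)[j.toNat]!
      = a[j.toNat]! ++ (rules.filter (fun p => PySem.Int.mod j p.1 == 0)).map (fun p => p.2) := by
  induction rules with
  | nil => intro a _; simp
  | cons p ps ih =>
    intro a ha
    have hp : p.1 ≠ 0 := hz p (by simp)
    have hs : (0 : Int) < |p.1| := by positivity
    have hjsz : j.toNat < a.size := by omega
    rw [List.foldl_cons, if_pos hp,
        ih (fun q hq => hz q (by simp [hq])) _ (by rw [pvSizeFoldlModify]; exact ha)]
    have hget := pvGetFoldlModify (PySem.List.pyRange |p.1| (m + 1) |p.1|)
      (pvNodupRange _ _ hs)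
      (fun x hx => by
        have := (PySem.List.mem_pyRange_iff_of_pos hs x).mp hx
        omega)
      (fun l => l ++ [p.2]) a j.toNat hjsz
    have hcast : ((j.toNat : Int)) = j := by omega
    rw [hcast] at hget
    rw [hget]
    have hdvd : (j ∈ PySem.List.pyRange |p.1| (m + 1) |p.1|) ↔ (PySem.Int.mod j p.1 == 0) = true := by
      rw [pvMemRangeIffDvd _ _ _ hs h1 hm, abs_dvd, beq_iff_eq, PySem.Int.mod_eq_zero_iff_dvd]
    by_cases hmem : j ∈ PySem.List.pyRange |p.1| (m + 1) |p.1|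
    · have hc : (PySem.Int.mod j p.1 == 0) = true := hdvd.mp hmem
      rw [if_pos hmem]
      simp [hc]
    · have hc : (PySem.Int.mod j p.1 == 0) = false := by
        simpa using (hdvd.not.mp hmem)
      rw [if_neg hmem]
      simp [hc]

-- ===== VERDICT (by name: the statement is the Claim_ definition above) =====
theorem fizzbuzz_zaawansowany_spec : Claim_equal_fizzbuzz_zaawansowany := by
  intro n zasady _ hpre
  unfold Spec_fizzbuzz_zaawansowany fizzbuzz_zaawansowany fizzbuzz_zaawansowany_alt
  by_cases hn : 1 ≤ n
  · have hm : (if n > 0 then n else 0) = n := if_pos (by omega)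
    rw [hm]
    rw [PySem.List.foldl_append_singleton_eq_map
      (f := fun liczba =>
        let tekst := PySem.Str.join ""
          (((PySem.List.sorted2 (PySem.Dict.ofList zasady).items (fun p => p.1) (fun p => p.2)).filter
              (fun p => PySem.Int.mod liczba p.1 == 0)).map (fun p => p.2))
        if tekst ≠ "" then tekst else PySem.Int.toStr liczba)]
    rw [List.nil_append]
    apply List.map_congr_left
    intro i hi
    have hi' : 1 ≤ i ∧ i < n + 1 := PySem.List.mem_pyRange_one.mp hi
    have hz : ∀ p ∈ PySem.List.sorted2 (PySem.Dict.ofList zasady).items (fun p => p.1) (fun p => p.2), p.1 ≠ 0 := by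
      intro p hp
      have hitems : p ∈ (PySem.Dict.ofList zasady).items :=
        (PySem.List.sorted2_perm _ _ _ _).mem_iff.mp hp
      have hkeys : p.1 ∈ (PySem.Dict.ofList zasady).keys := PySem.Dict.mem_keys_of_mem_items _ hitems
      have hkeq : (PySem.Dict.ofList zasady).keys = PySem.Set.ofList (zasady.map (·.1)) := by
        show (zasady.foldl (fun d x => d.insert x.1 x.2) (PySem.Dict.empty : PySem.Dict Int String)).keys = _
        exact PySem.Dict.keys_foldl_insert_key zasady (·.1) (fun _ x => x.2) _
      rw [hkeq, PySem.Set.mem_ofList, List.mem_map] at hkeys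
      obtain ⟨q, hq, hq1⟩ := hkeys
      rw [← hq1]
      exact hpre hn q hq
    have hsz : (Array.replicate (n + 1).toNat ([] : List String)).size = (n + 1).toNat := by
      simp
    have := pvSieve n _ hz i hi'.1 (by omega) (Array.replicate (n + 1).toNat []) hsz
    rw [this]
    have hrep : (Array.replicate (n + 1).toNat ([] : List String))[i.toNat]! = [] := by
      rw [getElem!_pos _ _ (by simp; omega)]
      exact Array.getElem_replicate _
    rw [hrep, List.nil_append]
  · have hm : (if n > 0 then n else 0) = 0 := if_neg (by omega)
    rw [PySem.List.pyRange_one_eq_nil (by omega : n + 1 ≤ 1), hm]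
    simp [PySem.List.pyRange_one_eq_nil]
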